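-- pv_equiv track=rewrite | github.com/mih-se-gl25/training_homeworkPython_ | newHomework_Codewars_style.py | partlist
-- ===== SOURCE A (Python) =====
-- def partlist(list_):
--     number = 0
--     out_list=[]
--     separator = " "
--     while number < len(list_):
--         for word in list_:
--             one_tup =  (separator.join(list_[:number+1]))
--             two_tup  = (separator.join(list_[number+1:]))
--             if two_tup == "":
--                 number = number+1
--                 break
--             step_tuple = (one_tup, two_tup)
--             out_list.append(step_tuple)
--             number = number +1
--     return out_list
-- ===== SOURCE B (Python) =====
-- def partlist(list_):
--     # Single pass with a running prefix and a shrinking residual suffix list,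
--     # instead of A's while/for with per-step full-list slicing and re-joins.
--     out_list = []
--     if len(list_) < 2:
--         return out_list
--     prefix = list_[0]
--     rest = list_[1:]
--     while rest:
--         out_list.append((prefix, " ".join(rest)))
--         prefix = prefix + " " + rest[0]
--         rest = rest[1:]
--     return out_list
-- ===== Notes on version B (the rewrite author's own statement) =====
-- stated objective: simpler
-- what changed: Replaces A's nested while/for with break and per-step full-list slicing plus two joins with a single pass that keeps a running prefix string and a shrinking residual suffix list.
-- intended difference: On lists of length >= 2 whose last word is the empty string, A drops the final (prefix, '') split (its empty-suffix test doubles as a termination check), e.g. on ['a',''] A returns an empty result while B returns [('a','')]; B's value is intended since every split position should be reported. — e.g. on partlist(["a", ""]): A returns [], B returns [("a", "")]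
import Mathlib
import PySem

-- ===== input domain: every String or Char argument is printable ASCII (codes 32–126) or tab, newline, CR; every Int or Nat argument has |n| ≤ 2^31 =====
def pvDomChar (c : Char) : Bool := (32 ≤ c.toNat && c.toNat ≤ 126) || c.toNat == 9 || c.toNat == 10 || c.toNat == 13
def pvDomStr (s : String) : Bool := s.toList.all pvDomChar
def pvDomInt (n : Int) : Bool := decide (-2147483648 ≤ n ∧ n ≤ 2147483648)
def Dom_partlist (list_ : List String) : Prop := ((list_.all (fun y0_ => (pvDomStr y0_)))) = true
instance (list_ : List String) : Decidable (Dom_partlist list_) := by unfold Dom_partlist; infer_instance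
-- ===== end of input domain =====

-- B replaces A's nested while/for-with-break and per-step slicing+joins by one pass with a
-- running prefix string and a shrinking residual suffix list (objective: simpler).

-- ===== PORT A =====
-- inner 'for word in list_' loop: carries (number, out); returns early on break (two_tup == "")
def forA (l : List String) (ws : List String) (number : Int)
    (out : List (String × String)) : Int × List (String × String) :=
  match ws with
  | [] => (number, out)
  | _ :: rest =>
    let one_tup := PySem.Str.join " " (PySem.List.slice l none (some (number + 1)))
    let two_tup := PySem.Str.join " " (PySem.List.slice l (some (number + 1)) none)
    if two_tup = "" then (number + 1, out)   -- break (number already incremented)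
    else forA l rest (number + 1) (out ++ [(one_tup, two_tup)])

-- outer 'while number < len(list_)' loop; fuel only makes it total (number grows each pass)
def whileA (l : List String) (number : Int) (out : List (String × String))
    (fuel : Nat) : List (String × String) :=
  match fuel with
  | 0 => out
  | f + 1 =>
    if number < (l.length : Int) then
      let r := forA l l number out
      whileA l r.1 r.2 f
    else out

def partlist (list_ : List String) : List (String × String) :=
  whileA list_ 0 [] (list_.length + 1)

-- ===== PORT B =====
-- single pass: append (prefix, " ".join(rest)), extend prefix, shrink rest
def loopB (pre : String) (rest : List String)
    (out : List (String × String)) : List (String × String) :=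
  match rest with
  | [] => out
  | w :: ws => loopB (pre ++ " " ++ w) ws (out ++ [(pre, PySem.Str.join " " (w :: ws))])

def partlist_alt (list_ : List String) : List (String × String) :=
  if list_.length < 2 then []
  else
    match list_ with
    | [] => []
    | x :: rest => loopB x rest []

-- ===== PRECONDITION & SPEC =====
-- On lists of length ≥ 2 whose last word is "", A drops the final (prefix, "") split (its
-- empty-suffix test doubles as a termination check), e.g. on ["a",""] A returns an empty
-- result while B returns [("a","")]; B's value is intended: every split position is reported.
def D_partlist (list_ : List String) : Prop :=
  2 ≤ list_.length ∧ list_.getLast? = some ""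
instance (list_ : List String) : Decidable (D_partlist list_) := by
  unfold D_partlist; infer_instance

def Spec_partlist (list_ : List String) (out : List (String × String)) : Prop :=
  ¬ D_partlist list_ → out = partlist_alt list_
instance (list_ : List String) (out : List (String × String)) : Decidable (Spec_partlist list_ out) := by
  unfold Spec_partlist; infer_instance

def pvDiffWitness_partlist : List String := ["a", ""]
def pvDiffWitnessOut_partlist : (List (String × String)) × (List (String × String)) :=
  ([], [("a", "")])

-- ===== CLAIM (what is proved, stated in full; the proofs are below) =====
def Claim_unchanged_partlist : Prop :=
  ∀ (list_ : List String), Dom_partlist list_ → Spec_partlist list_ (partlist list_)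
def Claim_changed_partlist : Prop :=
  Dom_partlist (pvDiffWitness_partlist) ∧ D_partlist (pvDiffWitness_partlist) ∧
  partlist (pvDiffWitness_partlist) = pvDiffWitnessOut_partlist.1 ∧
  partlist_alt (pvDiffWitness_partlist) = pvDiffWitnessOut_partlist.2 ∧
  pvDiffWitnessOut_partlist.1 ≠ pvDiffWitnessOut_partlist.2
def Claim_exact_partlist : Prop :=
  ∀ (list_ : List String), Dom_partlist list_ → D_partlist list_ →
    partlist list_ ≠ partlist_alt list_

-- ===== LEMMAS AND PROOFS =====

-- join facts
lemma joinStr_nil : PySem.Str.join " " ([] : List String) = "" := by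
  simp [PySem.Str.join, PySem.Chars.join_nil]

lemma joinStr_singleton (x : String) : PySem.Str.join " " [x] = x := by
  simp [PySem.Str.join, PySem.Chars.join_singleton]

lemma joinStr_cons_cons (x y : String) (ys : List String) :
    PySem.Str.join " " (x :: y :: ys) = x ++ " " ++ PySem.Str.join " " (y :: ys) := by
  simp [PySem.Str.join, PySem.Chars.join_cons_cons]
  apply String.toList_injective; simp

lemma joinStr_two_ne (x y : String) (ys : List String) :
    PySem.Str.join " " (x :: y :: ys) ≠ "" := by
  intro h
  have := congrArg String.toList h
  simp [PySem.Str.join, PySem.Chars.join_cons_cons] at this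

lemma joinStr_append_singleton (xs : List String) (y : String) (h : xs ≠ []) :
    PySem.Str.join " " (xs ++ [y]) = PySem.Str.join " " xs ++ " " ++ y := by
  induction xs with
  | nil => exact absurd rfl h
  | cons a as ih =>
    cases as with
    | nil => simp [joinStr_cons_cons, joinStr_singleton]
    | cons b bs =>
      calc PySem.Str.join " " ((a :: b :: bs) ++ [y])
          = a ++ " " ++ PySem.Str.join " " ((b :: bs) ++ [y]) := by
            simpa using joinStr_cons_cons a b (bs ++ [y])
        _ = a ++ " " ++ (PySem.Str.join " " (b :: bs) ++ " " ++ y) := by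
            rw [ih (by simp)]
        _ = PySem.Str.join " " (a :: b :: bs) ++ " " ++ y := by
            rw [joinStr_cons_cons]; simp [String.append_assoc]

-- characterisation of B's loop
def pairsB (p : String) (rest : List String) : List (String × String) :=
  match rest with
  | [] => []
  | w :: ws => (p, PySem.Str.join " " (w :: ws)) :: pairsB (p ++ " " ++ w) ws

lemma loopB_eq (rest : List String) : ∀ (p : String) (out : List (String × String)),
    loopB p rest out = out ++ pairsB p rest := by
  induction rest with
  | nil => intro p out; simp [loopB, pairsB]
  | cons w ws ih => intro p out; simp [loopB, pairsB, ih]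

-- A's inner loop, run from position j on a list whose last word is not "" :
-- it walks to the end appending exactly B's pairs, and leaves number = length.
lemma forA_run (l : List String) (hlast : l.getLast? ≠ some "") :
    ∀ (ws : List String) (j : Nat) (out : List (String × String)),
      j < l.length → ws.length = l.length - j →
      forA l ws (j : Int) out =
        ((l.length : Int),
         out ++ pairsB (PySem.Str.join " " (l.take (j + 1))) (l.drop (j + 1))) := by
  intro ws
  induction ws with
  | nil => intro j out hj hlen; simp at hlen; omega
  | cons w0 rest ih =>
    intro j out hj hlen
    have hcast : (j : Int) + 1 = ((j + 1 : Nat) : Int) := by push_cast; ring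
    have hto : PySem.List.slice l none (some ((j : Int) + 1)) = l.take (j + 1) := by
      rw [hcast]; exact PySem.List.slice_to_natCast l (j + 1)
    have hfrom : PySem.List.slice l (some ((j : Int) + 1)) none = l.drop (j + 1) := by
      rw [hcast]; exact PySem.List.slice_from_natCast l (j + 1)
    rcases hdrop : l.drop (j + 1) with _ | ⟨w, ws2⟩
    · -- suffix empty: j + 1 = length, break
      have hlen1 : l.length ≤ j + 1 := by
        have := congrArg List.length hdrop
        simp only [List.length_drop, List.length_nil] at this; omega
      have hj1 : l.length = j + 1 := by omega
      rw [forA]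
      simp only [hto, hfrom, hdrop, joinStr_nil]
      rw [if_pos trivial, hj1]
      refine Prod.ext ?_ ?_
      · show (j : Int) + 1 = ((j + 1 : Nat) : Int); exact hcast
      · show out = out ++ pairsB _ []; simp [pairsB]
    · -- suffix nonempty: two_tup ≠ "", append pair, recurse
      have hdl : (l.drop (j + 1)).length = ws2.length + 1 := by rw [hdrop]; simp
      rw [List.length_drop] at hdl
      have htake : l.take (j + 1 + 1) = l.take (j + 1) ++ [w] := by
        conv_lhs => rw [← List.take_append_drop (j + 1) l, hdrop]
        rw [List.take_append]
        have h1 : (l.take (j + 1)).length = j + 1 := by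
          rw [List.length_take]; omega
        rw [List.take_of_length_le (by omega), h1]
        simp
      have hdrop2 : l.drop (j + 1 + 1) = ws2 := by
        have h2 : l.drop (j + 1 + 1) = (l.drop (j + 1)).drop 1 := by
          rw [List.drop_drop]
        rw [h2, hdrop]; simp
      have htwo : PySem.Str.join " " (w :: ws2) ≠ "" := by
        cases ws2 with
        | nil =>
          rw [joinStr_singleton]
          intro hw
          apply hlast
          have hl : l = l.take (j + 1) ++ [w] := by
            conv_lhs => rw [← List.take_append_drop (j + 1) l, hdrop]
          rw [hl, hw]
          simp
        | cons y ys => exact joinStr_two_ne w y ys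
      rw [forA]
      simp only [hto, hfrom, hdrop, if_neg htwo]
      have hlen2 : rest.length = l.length - (j + 1) := by
        simp only [List.length_cons] at hlen; omega
      have hj2 : j + 1 < l.length := Nat.lt_of_sub_eq_succ hdl
      have hrec := ih (j + 1) (out ++ [(PySem.Str.join " " (l.take (j + 1)),
                 PySem.Str.join " " (w :: ws2))]) hj2 hlen2
      rw [hcast, hrec]
      have hlne : l ≠ [] := List.length_pos_iff.mp (by omega)
      have htne : l.take (j + 1) ≠ [] := by simp [List.take_eq_nil_iff, hlne]
      have hpre : PySem.Str.join " " (l.take (j + 1)) ++ " " ++ w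
          = PySem.Str.join " " (l.take (j + 1 + 1)) := by
        rw [htake, joinStr_append_singleton _ _ htne]
      conv_rhs => rw [pairsB]
      rw [hdrop2] at hrec ⊢
      simp [hpre]

lemma whileA_exit (l : List String) (number : Int) (out : List (String × String))
    (fuel : Nat) (h : ¬ number < (l.length : Int)) :
    whileA l number out fuel = out := by
  cases fuel with
  | zero => rfl
  | succ f => rw [whileA]; simp [h]

lemma whileA_step (l : List String) (number : Int) (out : List (String × String))
    (f : Nat) (h : number < (l.length : Int)) :
    whileA l number out (f + 1)
      = whileA l (forA l l number out).1 (forA l l number out).2 f := by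
  rw [whileA]; simp [h]

-- every pair A ever appends has a nonempty second component
lemma forA_snd_ne (l : List String) : ∀ (ws : List String) (j : Int)
    (out : List (String × String)) (p : String × String),
    p ∈ (forA l ws j out).2 → p ∈ out ∨ p.2 ≠ "" := by
  intro ws
  induction ws with
  | nil => intro j out p hp; exact Or.inl hp
  | cons w rest ih =>
    intro j out p hp
    rw [forA] at hp
    by_cases h2 : PySem.Str.join " " (PySem.List.slice l (some (j + 1)) none) = ""
    · simp only [if_pos h2] at hp; exact Or.inl hp
    · simp only [if_neg h2] at hp
      rcases ih (j + 1) _ p hp with hin | hne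
      · rcases List.mem_append.mp hin with h | h
        · exact Or.inl h
        · right; rw [List.mem_singleton] at h; rw [h]; exact h2
      · exact Or.inr hne

lemma whileA_snd_ne (l : List String) (fuel : Nat) : ∀ (number : Int)
    (out : List (String × String)) (p : String × String),
    p ∈ whileA l number out fuel → p ∈ out ∨ p.2 ≠ "" := by
  induction fuel with
  | zero => intro n out p hp; exact Or.inl hp
  | succ f ih =>
    intro n out p hp
    rw [whileA] at hp
    by_cases h : n < (l.length : Int)
    · simp only [if_pos h] at hp
      rcases ih _ _ p hp with hin | hne
      · exact forA_snd_ne l l n out p hin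
      · exact Or.inr hne
    · simp only [if_neg h] at hp; exact Or.inl hp

-- B always reports the split before the last word, whose suffix is that word
lemma pairsB_last_mem (rest : List String) : ∀ (p : String) (h : rest ≠ []),
    ∃ q ∈ pairsB p rest, q.2 = PySem.Str.join " " [rest.getLast h] := by
  induction rest with
  | nil => intro p h; exact absurd rfl h
  | cons w ws ih =>
    intro p hne
    cases ws with
    | nil => exact ⟨(p, PySem.Str.join " " [w]), by simp [pairsB], by simp⟩
    | cons y ys =>
      obtain ⟨q, hq, hq2⟩ := ih (p ++ " " ++ w) (by simp)
      refine ⟨q, ?_, ?_⟩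
      · rw [pairsB]; exact List.mem_cons_of_mem _ hq
      · have hgl : (w :: y :: ys).getLast hne = (y :: ys).getLast (by simp) :=
          List.getLast_cons (by simp)
        rw [hq2, hgl]

lemma partlist_alt_cons2 (x y : String) (rest : List String) :
    partlist_alt (x :: y :: rest) = pairsB x (y :: rest) := by
  rw [partlist_alt, if_neg (by simp only [List.length_cons]; omega)]
  exact loopB_eq (y :: rest) x []

-- ===== VERDICT (by name: the statement is the Claim_ definition above) =====
theorem partlist_spec : Claim_unchanged_partlist := by
  intro l _ hD
  unfold partlist
  match l with
  | [] => rw [whileA_exit] <;> simp [partlist_alt]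
  | [x] =>
    have hfrom1 : PySem.List.slice [x] (some ((0 : Int) + 1)) none = ([] : List String) := by
      rw [PySem.List.slice_from _ (by norm_num)]; rfl
    have h1 : forA [x] [x] (0 : Int) [] = (1, []) := by
      rw [forA]
      simp only [hfrom1, joinStr_nil]
      rw [if_pos trivial]
      norm_num
    rw [whileA_step _ _ _ _ (by simp), h1,
        whileA_exit _ _ _ _ (by simp)]
    simp [partlist_alt]
  | x :: y :: rest =>
    have hlast : (x :: y :: rest).getLast? ≠ some "" :=
      fun h => hD ⟨by simp only [List.length_cons]; omega, h⟩
    have hrun := forA_run (x :: y :: rest) hlast (x :: y :: rest) 0 [] (by simp) (by simp)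
    simp only [Int.natCast_zero] at hrun
    have hpos : (0 : Int) < ((x :: y :: rest).length : Int) := by
      have : 0 < (x :: y :: rest).length := by simp
      exact_mod_cast this
    rw [whileA_step _ _ _ _ hpos, hrun, whileA_exit _ _ _ _ (by simp)]
    rw [partlist_alt_cons2]
    have htake1 : (x :: y :: rest).take (0 + 1) = [x] := by simp
    have hdrop1 : (x :: y :: rest).drop (0 + 1) = y :: rest := by simp
    simp [htake1, hdrop1, joinStr_singleton]

theorem partlist_changed : Claim_changed_partlist := by
  unfold Claim_changed_partlist; decide

theorem partlist_tight : Claim_exact_partlist := by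
  intro l _ hD heq
  obtain ⟨hlen, hlast⟩ := hD
  match l, hlen with
  | x :: y :: rest, _ =>
    have hB : partlist_alt (x :: y :: rest) = pairsB x (y :: rest) :=
      partlist_alt_cons2 x y rest
    obtain ⟨q, hq, hq2⟩ := pairsB_last_mem (y :: rest) x (by simp)
    have hqA : q ∈ partlist (x :: y :: rest) := by
      rw [heq, hB]; exact hq
    have hqlast : (y :: rest).getLast (by simp) = "" := by
      rw [List.getLast?_cons_cons, List.getLast?_eq_some_getLast (by simp)] at hlast
      exact Option.some.inj hlast
    have hq2' : q.2 = "" := by rw [hq2, hqlast, joinStr_singleton]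
    unfold partlist at hqA
    rcases whileA_snd_ne (x :: y :: rest) _ _ _ _ hqA with h | h
    · simp at h
    · exact h hq2'
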